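-- pv_equiv track=rewrite | github.com/acacar/aoc2024 | 7.py | part1
-- ===== SOURCE A (Python) =====
-- from itertools import product
--
-- operators = {
--     "+": lambda x,y: x+y,
--      "*": lambda x,y: x*y,
--      "|": lambda x,y: int(str(x)+str(y))
--  }
--
-- def part1(input):
--     retval = 0
--     for k,v in input.items():
--         number_of_positions = len(v)-1
--         # Generate all possible combinations of operators
--         operator_combinations = []
--         for ops in product('*+', repeat=number_of_positions):
--             operator_combinations.append(''.join(ops))
--         for opcombo in operator_combinations:
--             stack = [x for x in v]
--             stack.reverse()
--             for op in opcombo: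
--                 stack.append(operators[op](stack.pop(), stack.pop()))
--             if stack[0] == k:
--                 retval += k
--                 break
--     return retval
-- ===== SOURCE B (Python) =====
-- def part1(input):
--     total = 0
--     for k, v in input.items():
--         vals = {v[0]}
--         for x in v[1:]:
--             vals = {w + x for w in vals} | {w * x for w in vals}
--         if k in vals:
--             total += k
--     return total
-- ===== Notes on version B (the rewrite author's own statement) =====
-- stated objective: faster
-- what changed: Instead of materialising every operator string from product('*+', repeat=n-1) and re-evaluating a stack for each, B keeps one set of partial results reachable so far and extends it left-to-right with + and *, deduplicating as it goes; membership of the target replaces the combo search.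
import Mathlib
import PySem

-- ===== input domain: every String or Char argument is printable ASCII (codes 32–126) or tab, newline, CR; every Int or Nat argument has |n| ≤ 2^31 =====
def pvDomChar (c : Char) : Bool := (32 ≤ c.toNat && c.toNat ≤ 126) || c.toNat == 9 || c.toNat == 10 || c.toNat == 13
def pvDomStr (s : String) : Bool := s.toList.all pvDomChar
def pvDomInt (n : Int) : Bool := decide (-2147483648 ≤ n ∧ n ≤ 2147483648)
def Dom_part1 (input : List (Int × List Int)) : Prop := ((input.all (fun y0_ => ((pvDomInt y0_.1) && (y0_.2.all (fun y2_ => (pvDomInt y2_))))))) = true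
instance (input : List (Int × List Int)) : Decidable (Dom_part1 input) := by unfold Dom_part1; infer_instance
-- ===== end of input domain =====

-- B replaces A's enumeration of all operator strings by a forward reachable-result set
-- (measured faster in a timing run on the generated inputs).

-- ===== PORT A =====
-- operators[op] for the ops that product('*+', …) can produce ('|' is never generated)
def opApply (op : Char) (x y : Int) : Int := if op = '*' then x * y else x + y

-- product('*+', repeat=n), each tuple joined to a string (kept as List Char)
def prodStar (n : Nat) : List (List Char) :=
  match n with
  | 0 => [[]]
  | n + 1 => (['*', '+'].map (fun c => (prodStar n).map (c :: ·))).flatten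

-- the stack loop; Lean head = Python list end (pop side); stack starts as reversed v,
-- whose pop side is v's front, i.e. the Lean list v itself
def evalStack (stack : List Int) (ops : List Char) : List Int :=
  ops.foldl (fun st op =>
    match st with
    | a :: b :: t => opApply op a b :: t
    | _ => st) stack

-- for opcombo in operator_combinations: … if stack[0] == k: retval += k; break
def tryCombos (k : Int) (v : List Int) (combos : List (List Char)) : Int :=
  match combos with
  | [] => 0
  | c :: rest =>
      if (evalStack v c).getLast?.getD 0 = k then k else tryCombos k v rest

def part1 (input : List (Int × List Int)) : Int :=
  input.foldl (fun retval kv =>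
    retval + tryCombos kv.1 kv.2 (prodStar (kv.2.length - 1))) 0

-- ===== PORT B =====
-- vals = {w + x for w in vals} | {w * x for w in vals}, folded over v[1:]
def reach (v0 : Int) (rest : List Int) : PySem.Set Int :=
  rest.foldl (fun vals x =>
    PySem.Set.union (PySem.Set.ofList (vals.map (· + x))) (vals.map (· * x)))
    (PySem.Set.ofList [v0])

def part1_alt (input : List (Int × List Int)) : Int :=
  input.foldl (fun total kv =>
    match kv.2 with
    | [] => total   -- unreachable under Pre_part1 (Python B raises IndexError on v[0])
    | v0 :: rest =>
        total + (if PySem.Set.contains (reach v0 rest) kv.1 then kv.1 else 0)) 0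

-- ===== PRECONDITION & SPEC =====
-- Pre_ excludes entries with an empty value list: there A raises ValueError
-- (product(repeat=-1)) and B raises IndexError (v[0]); neither returns.
def Pre_part1 (input : List (Int × List Int)) : Prop := ∀ p ∈ input, p.2 ≠ []
instance (input : List (Int × List Int)) : Decidable (Pre_part1 input) := by unfold Pre_part1; infer_instance

def pvWitness_part1 : (List (Int × List Int)) := [(3, [1, 2]), (10, [2, 5])]

def Spec_part1 (input : List (Int × List Int)) (out : Int) : Prop := out = part1_alt input
instance (input : List (Int × List Int)) (out : Int) : Decidable (Spec_part1 input out) := by unfold Spec_part1; infer_instance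

-- ===== CLAIM (what is proved, stated in full; the proofs are below) =====
def Claim_equal_part1 : Prop := ∀ (input : List (Int × List Int)), Dom_part1 input → Pre_part1 input → Spec_part1 input (part1 input)

-- ===== LEMMAS AND PROOFS =====

-- the value computed by one full stack reduction, as a two-list recursion
def go (a : Int) (rest : List Int) (ops : List Char) : Int :=
  match rest, ops with
  | x :: t, op :: os => go (opApply op a x) t os
  | _, _ => a

theorem evalStack_cons (a x : Int) (t : List Int) (op : Char) (ops : List Char) :
    evalStack (a :: x :: t) (op :: ops) = evalStack (opApply op a x :: t) ops := rfl

theorem evalStack_spec (rest : List Int) (ops : List Char) (a : Int)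
    (h : ops.length = rest.length) :
    evalStack (a :: rest) ops = [go a rest ops] := by
  induction rest generalizing a ops with
  | nil =>
      cases ops with
      | nil => rfl
      | cons op os => simp at h
  | cons x t ih =>
      cases ops with
      | nil => simp at h
      | cons op os =>
          rw [evalStack_cons]
          simp only [List.length_cons, Nat.succ.injEq] at h
          rw [ih os _ h]
          rfl

theorem length_mem_prodStar (n : Nat) (c : List Char) (hc : c ∈ prodStar n) :
    c.length = n := by
  induction n generalizing c with
  | zero => simp [prodStar] at hc; simp [hc]
  | succ n ih =>
      simp only [prodStar, List.mem_flatten, List.mem_map] at hc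
      obtain ⟨l, ⟨ch, _, rfl⟩, hl⟩ := hc
      obtain ⟨c', hc', rfl⟩ := List.mem_map.mp hl
      simp [ih c' hc']

theorem mem_prodStar_succ (n : Nat) (c : List Char) :
    c ∈ prodStar (n + 1) ↔ ∃ ch ∈ (['*', '+'] : List Char), ∃ c' ∈ prodStar n, c = ch :: c' := by
  simp only [prodStar, List.mem_flatten, List.mem_map]
  constructor
  · rintro ⟨l, ⟨ch, hch, rfl⟩, hl⟩
    obtain ⟨c', hc', rfl⟩ := List.mem_map.mp hl
    exact ⟨ch, hch, c', hc', rfl⟩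
  · rintro ⟨ch, hch, c', hc', rfl⟩
    exact ⟨(prodStar n).map (ch :: ·), ⟨ch, hch, rfl⟩, List.mem_map.mpr ⟨c', hc', rfl⟩⟩

theorem tryCombos_eq (k : Int) (v : List Int) (combos : List (List Char)) :
    tryCombos k v combos =
      if ∃ c ∈ combos, (evalStack v c).getLast?.getD 0 = k then k else 0 := by
  induction combos with
  | nil => simp [tryCombos]
  | cons c rest ih =>
      simp only [tryCombos, ih]
      by_cases h : (evalStack v c).getLast?.getD 0 = k
      · simp [h]
      · simp [h]

-- one fold step of reach, membership
theorem mem_step (S : PySem.Set Int) (x b : Int) :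
    b ∈ PySem.Set.union (PySem.Set.ofList (S.map (· + x))) (S.map (· * x)) ↔
      ∃ a ∈ S, ∃ ch ∈ (['*', '+'] : List Char), b = opApply ch a x := by
  rw [PySem.Set.mem_union]
  simp only [PySem.Set.mem_ofList, List.mem_map]
  constructor
  · rintro (⟨a, ha, rfl⟩ | ⟨a, ha, rfl⟩)
    · exact ⟨a, ha, '+', by simp, by simp [opApply]⟩
    · exact ⟨a, ha, '*', by simp, by simp [opApply]⟩
  · rintro ⟨a, ha, ch, hch, rfl⟩
    simp only [List.mem_cons, List.not_mem_nil, or_false] at hch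
    rcases hch with h | h
    · subst h; exact Or.inr ⟨a, ha, by simp [opApply]⟩
    · subst h; exact Or.inl ⟨a, ha, by simp [opApply]⟩

theorem mem_reach_fold (rest : List Int) (S : PySem.Set Int) (k : Int) :
    (k ∈ rest.foldl (fun vals x =>
        PySem.Set.union (PySem.Set.ofList (vals.map (· + x))) (vals.map (· * x))) S) ↔
      ∃ a ∈ S, ∃ c ∈ prodStar rest.length, go a rest c = k := by
  induction rest generalizing S with
  | nil =>
      simp [prodStar, go]
  | cons x t ih =>
      simp only [List.foldl_cons, ih, List.length_cons]
      constructor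
      · rintro ⟨b, hb, c, hc, hgo⟩
        obtain ⟨a, ha, ch, hch, rfl⟩ := (mem_step S x b).mp hb
        exact ⟨a, ha, ch :: c, (mem_prodStar_succ t.length _).mpr ⟨ch, hch, c, hc, rfl⟩, hgo⟩
      · rintro ⟨a, ha, c, hc, hgo⟩
        obtain ⟨ch, hch, c', hc', rfl⟩ := (mem_prodStar_succ t.length c).mp hc
        exact ⟨opApply ch a x, (mem_step S x _).mpr ⟨a, ha, ch, hch, rfl⟩, c', hc', hgo⟩

theorem entry_eq (k v0 : Int) (rest : List Int) :
    tryCombos k (v0 :: rest) (prodStar ((v0 :: rest).length - 1)) =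
      if PySem.Set.contains (reach v0 rest) k then k else 0 := by
  have hlen : (v0 :: rest).length - 1 = rest.length := by simp
  rw [hlen, tryCombos_eq]
  have hmem : (∃ c ∈ prodStar rest.length, (evalStack (v0 :: rest) c).getLast?.getD 0 = k) ↔
      k ∈ reach v0 rest := by
    rw [reach, mem_reach_fold]
    constructor
    · rintro ⟨c, hc, hv⟩
      rw [evalStack_spec rest c v0 (length_mem_prodStar _ _ hc)] at hv
      simp only [List.getLast?_singleton, Option.getD_some] at hv
      exact ⟨v0, by simp [PySem.Set.mem_ofList], c, hc, hv⟩
    · rintro ⟨a, ha, c, hc, hgo⟩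
      have hav : a = v0 := by simpa [PySem.Set.mem_ofList] using ha
      refine ⟨c, hc, ?_⟩
      rw [evalStack_spec rest c v0 (length_mem_prodStar _ _ hc)]
      simpa [← hav] using hgo
  by_cases h : k ∈ reach v0 rest
  · have hc : PySem.Set.contains (reach v0 rest) k = true := (PySem.Set.contains_iff _ _).mpr h
    simp only [hmem.mpr h, if_true, hc]
  · have hc : PySem.Set.contains (reach v0 rest) k = false := by
      cases hcc : PySem.Set.contains (reach v0 rest) k
      · rfl
      · exact absurd ((PySem.Set.contains_iff _ _).mp hcc) h
    have hne : ¬ ∃ c ∈ prodStar rest.length, (evalStack (v0 :: rest) c).getLast?.getD 0 = k :=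
      fun hx => h (hmem.mp hx)
    simp only [hne, if_false, hc]
    simp

theorem fold_eq (input : List (Int × List Int)) (acc : Int)
    (hpre : ∀ p ∈ input, p.2 ≠ []) :
    input.foldl (fun retval kv =>
        retval + tryCombos kv.1 kv.2 (prodStar (kv.2.length - 1))) acc =
    input.foldl (fun total kv =>
        match kv.2 with
        | [] => total
        | v0 :: rest =>
            total + (if PySem.Set.contains (reach v0 rest) kv.1 then kv.1 else 0)) acc := by
  induction input generalizing acc with
  | nil => rfl
  | cons kv rest ih =>
      simp only [List.foldl_cons]
      have hkv : kv.2 ≠ [] := hpre kv (by simp)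
      obtain ⟨v0, vrest, hv⟩ := List.exists_cons_of_ne_nil hkv
      rw [hv, entry_eq kv.1 v0 vrest]
      exact ih _ (fun p hp => hpre p (by simp [hp]))

-- ===== VERDICT (by name: the statement is the Claim_ definition above) =====
theorem part1_spec : Claim_equal_part1 := by
  intro input _ hpre
  unfold Spec_part1 part1 part1_alt
  exact fold_eq input 0 hpre
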